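-- pv_equiv track=rewrite | github.com/blatth/uba-introprog | Parciales/Parcial Python/Parcial2024.py | tiempo_mas_rapido
-- ===== SOURCE A (Python) =====
-- def tiempo_mas_rapido (tiempos_salas: list[int])-> int:
--   res:int = 0
--   tiempoMasRapido:int = 61
--   i:int = 0
--
--   while i < len(tiempos_salas):
--     if tiempos_salas[i] < tiempoMasRapido and tiempos_salas[i] != 0 and tiempos_salas[i] != 61:
--       tiempoMasRapido = tiempos_salas[i]
--       res = i
--       i += 1
--     else:
--       i += 1
--
--   return res
-- ===== SOURCE B (Python) =====
-- def tiempo_mas_rapido(tiempos_salas: list[int]) -> int: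
--     candidatos = [(t, i) for i, t in enumerate(tiempos_salas) if t < 61 and t != 0]
--     if not candidatos:
--         return 0
--     return min(candidatos, key=lambda p: p[0])[1]
-- ===== Notes on version B (the rewrite author's own statement) =====
-- stated objective: idiomatic
-- what changed: Replaces A's inline minimum-tracking while loop (mutable res/tiempoMasRapido/i state) with a filter-then-reduce decomposition: build the (time, index) candidate list once, then take min by time (first occurrence on ties).
import Mathlib
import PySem

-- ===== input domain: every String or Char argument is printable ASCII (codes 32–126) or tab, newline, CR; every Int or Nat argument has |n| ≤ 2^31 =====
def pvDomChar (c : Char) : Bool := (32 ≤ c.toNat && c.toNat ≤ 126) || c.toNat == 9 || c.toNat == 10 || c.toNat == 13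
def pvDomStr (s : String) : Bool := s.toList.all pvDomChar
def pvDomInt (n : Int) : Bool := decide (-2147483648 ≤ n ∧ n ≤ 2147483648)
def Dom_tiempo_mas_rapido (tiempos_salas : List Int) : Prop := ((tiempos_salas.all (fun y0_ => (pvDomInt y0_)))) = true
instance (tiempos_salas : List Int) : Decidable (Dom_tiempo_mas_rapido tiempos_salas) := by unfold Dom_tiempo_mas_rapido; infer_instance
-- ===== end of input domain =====

-- B replaces A's inline minimum-tracking while loop by a filter-then-reduce decomposition
-- (candidate (time, index) pairs, then first minimum by time); same O(n) cost, more idiomatic.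


-- ===== PORT A =====
-- the while loop over index i with mutable state (res, tiempoMasRapido); the list is
-- walked in step with i, so the head of the remaining list is tiempos_salas[i]
def tiempo_mas_rapido_go : List Int → Int → Int → Int → Int
  | [], res, _, _ => res
  | t :: rest, res, tmr, i =>
    if t < tmr ∧ t ≠ 0 ∧ t ≠ 61 then tiempo_mas_rapido_go rest i t (i + 1)
    else tiempo_mas_rapido_go rest res tmr (i + 1)

def tiempo_mas_rapido (tiempos_salas : List Int) : Int :=
  tiempo_mas_rapido_go tiempos_salas 0 61 0

-- ===== PORT B =====
def tiempo_mas_rapido_alt (tiempos_salas : List Int) : Int :=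
  let candidatos :=
    ((PySem.List.enumerate tiempos_salas 0).filter
        (fun p => decide (p.2 < 61) && decide (p.2 ≠ 0))).map (fun p => (p.2, p.1))
  match PySem.List.min? candidatos (fun p => p.1) with
  | none => 0
  | some p => p.2

-- ===== PRECONDITION & SPEC =====
def Spec_tiempo_mas_rapido (tiempos_salas : List Int) (out : Int) : Prop := out = tiempo_mas_rapido_alt tiempos_salas
instance (tiempos_salas : List Int) (out : Int) : Decidable (Spec_tiempo_mas_rapido tiempos_salas out) := by unfold Spec_tiempo_mas_rapido; infer_instance

-- ===== CLAIM (what is proved, stated in full; the proofs are below) =====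
def Claim_equal_tiempo_mas_rapido : Prop := ∀ (tiempos_salas : List Int), Dom_tiempo_mas_rapido tiempos_salas → Spec_tiempo_mas_rapido tiempos_salas (tiempo_mas_rapido tiempos_salas)

-- ===== LEMMAS AND PROOFS =====

-- B's candidate list, started at index i (abbreviation for the proofs)
def pvCand (ts : List Int) (i : Int) : List (Int × Int) :=
  ((PySem.List.enumerate ts i).filter
      (fun p => decide (p.2 < 61) && decide (p.2 ≠ 0))).map (fun p => (p.2, p.1))

-- the fold step of PySem.List.min? with key Prod.fst
def pvStep (acc : Option (Int × Int)) (x : Int × Int) : Option (Int × Int) :=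
  match acc with
  | none => some x
  | some m => if x.1 < m.1 then some x else some m

lemma pvCand_cons (t : Int) (rest : List Int) (i : Int) :
    pvCand (t :: rest) i =
      if t < 61 ∧ t ≠ 0 then (t, i) :: pvCand rest (i + 1) else pvCand rest (i + 1) := by
  simp only [pvCand, PySem.List.enumerate_cons, List.filter_cons]
  by_cases h : t < 61 ∧ t ≠ 0
  · simp [h.1, h.2]
  · rcases not_and_or.mp h with h1 | h1 <;> simp [h1]

lemma pvCand_mem (ts : List Int) (i : Int) (p : Int × Int) (hp : p ∈ pvCand ts i) :
    p.1 < 61 := by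
  simp only [pvCand, List.mem_map, List.mem_filter, Bool.and_eq_true, decide_eq_true_eq] at hp
  obtain ⟨q, ⟨-, hq, -⟩, rfl⟩ := hp
  exact hq

-- loop invariant: folding pvStep from the running state (tmr, res) over the remaining
-- candidates yields exactly A's loop result in the second component
lemma pv_invariant (ts : List Int) :
    ∀ (i res tmr : Int), tmr ≤ 61 →
      ∃ tmr', List.foldl pvStep (some (tmr, res)) (pvCand ts i)
                = some (tmr', tiempo_mas_rapido_go ts res tmr i) := by
  induction ts with
  | nil => intro i res tmr _; exact ⟨tmr, by simp [pvCand, tiempo_mas_rapido_go]⟩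
  | cons t rest ih =>
    intro i res tmr htmr
    rw [pvCand_cons]
    by_cases hP : t < 61 ∧ t ≠ 0
    · simp only [if_pos hP, List.foldl_cons]
      by_cases hlt : t < tmr
      · have hA : t < tmr ∧ t ≠ 0 ∧ t ≠ 61 := ⟨hlt, hP.2, by omega⟩
        have : pvStep (some (tmr, res)) (t, i) = some (t, i) := by
          simp [pvStep, hlt]
        rw [this]
        obtain ⟨tmr', h'⟩ := ih (i + 1) i t (le_of_lt hP.1)
        exact ⟨tmr', by rw [h']; simp [tiempo_mas_rapido_go, hA]⟩
      · have hA : ¬(t < tmr ∧ t ≠ 0 ∧ t ≠ 61) := by tauto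
        have : pvStep (some (tmr, res)) (t, i) = some (tmr, res) := by
          simp [pvStep, hlt]
        rw [this]
        obtain ⟨tmr', h'⟩ := ih (i + 1) res tmr htmr
        exact ⟨tmr', by rw [h']; simp [tiempo_mas_rapido_go, hA]⟩
    · have hA : ¬(t < tmr ∧ t ≠ 0 ∧ t ≠ 61) := by
        rintro ⟨h1, h2, h3⟩; exact hP ⟨by omega, h2⟩
      rw [if_neg hP]
      obtain ⟨tmr', h'⟩ := ih (i + 1) res tmr htmr
      exact ⟨tmr', by rw [h']; simp [tiempo_mas_rapido_go, hA]⟩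

-- min? with key Prod.fst is exactly the pvStep fold from none
lemma pv_min?_eq (l : List (Int × Int)) :
    PySem.List.min? l (fun p => p.1) = List.foldl pvStep none l := by
  simp only [PySem.List.min?]
  congr 1
  funext acc x
  cases acc <;> rfl

-- ===== VERDICT (by name: the statement is the Claim_ definition above) =====
theorem tiempo_mas_rapido_spec : Claim_equal_tiempo_mas_rapido := by
  intro ts _
  show tiempo_mas_rapido ts = tiempo_mas_rapido_alt ts
  have hB : tiempo_mas_rapido_alt ts =
      match PySem.List.min? (pvCand ts 0) (fun p => p.1) with
      | none => 0
      | some p => p.2 := rfl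
  obtain ⟨tmr', hinv⟩ := pv_invariant ts 0 0 61 le_rfl
  rw [hB, pv_min?_eq]
  cases hc : pvCand ts 0 with
  | nil =>
    rw [hc] at hinv
    simp only [List.foldl_nil] at hinv
    have h2 : tiempo_mas_rapido_go ts 0 61 0 = 0 := by
      have h3 := congrArg Prod.snd (Option.some_inj.mp hinv)
      exact h3.symm
    simpa [tiempo_mas_rapido, hc] using h2
  | cons c l =>
    have hc1 : c.1 < 61 := pvCand_mem ts 0 c (hc ▸ List.mem_cons_self ..)
    rw [hc] at hinv
    simp only [List.foldl_cons] at hinv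
    have hstep : pvStep (some ((61 : Int), (0 : Int))) c = some c := by
      simp [pvStep, hc1]
    rw [hstep] at hinv
    have : List.foldl pvStep none (c :: l) = some (tmr', tiempo_mas_rapido_go ts 0 61 0) := by
      simpa [pvStep] using hinv
    rw [this]
    rfl
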